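-- pv_equiv track=rewrite | github.com/kptunterhose/convertToBlenderPython | final_ReadOrbitalFilesForBlender.py | makeDictOfKnots
-- ===== SOURCE A (Python) =====
-- def makeDictOfKnots(listOfFaces, listOfVerts):
--     knotenDict = dict()
--     for i in range(len(listOfVerts)):
--         knotenDict[i] = set()
--         for triangle in listOfFaces:
--             if i in triangle:
--                 for knot in triangle:
--                     if knot != i:
--                         knotenDict[i].add(knot)
--     return knotenDict
-- ===== SOURCE B (Python) =====
-- def makeDictOfKnots(listOfFaces, listOfVerts):
--     n = len(listOfVerts)
--     adj = {i: set() for i in range(n)}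
--     for face in listOfFaces:
--         for v in face:
--             if 0 <= v < n:
--                 for w in face:
--                     if w != v:
--                         adj[v].add(w)
--     return adj
-- ===== Notes on version B (the rewrite author's own statement) =====
-- stated objective: faster
-- what changed: Instead of scanning the whole face list once per vertex index, B initialises all adjacency sets and makes a single pass over the faces, adding the pairwise neighbours of each in-range vertex it meets.
import Mathlib
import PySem

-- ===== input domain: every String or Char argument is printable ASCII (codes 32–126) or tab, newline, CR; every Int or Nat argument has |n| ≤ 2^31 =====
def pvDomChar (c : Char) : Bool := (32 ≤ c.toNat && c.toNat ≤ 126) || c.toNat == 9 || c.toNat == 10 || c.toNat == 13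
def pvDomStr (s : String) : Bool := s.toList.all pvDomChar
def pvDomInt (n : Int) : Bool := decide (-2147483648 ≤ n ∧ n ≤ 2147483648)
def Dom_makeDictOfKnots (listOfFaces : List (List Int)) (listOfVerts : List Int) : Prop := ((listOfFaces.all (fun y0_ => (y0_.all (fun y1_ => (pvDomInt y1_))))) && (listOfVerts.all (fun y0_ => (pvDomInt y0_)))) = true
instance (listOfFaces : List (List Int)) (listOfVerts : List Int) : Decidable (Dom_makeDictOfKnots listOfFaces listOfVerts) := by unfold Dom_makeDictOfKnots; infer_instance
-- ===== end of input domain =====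

-- B makes a single pass over the faces instead of one pass per vertex index (asymptotically faster; return value proved identical).
-- ===== PORT A =====
def makeDictOfKnots (listOfFaces : List (List Int)) (listOfVerts : List Int) : List (Int × List Int) :=
  ((PySem.List.pyRange 0 listOfVerts.length 1).foldl (fun knotenDict i =>
    let knotenDict := knotenDict.insert i PySem.Set.empty
    listOfFaces.foldl (fun knotenDict triangle =>
      if i ∈ triangle then
        triangle.foldl (fun knotenDict knot =>
          if knot ≠ i then knotenDict.modify i PySem.Set.empty (fun s => PySem.Set.add s knot)
          else knotenDict) knotenDict
      else knotenDict) knotenDict) PySem.Dict.empty).items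

-- ===== PORT B =====
def makeDictOfKnots_alt (listOfFaces : List (List Int)) (listOfVerts : List Int) : List (Int × List Int) :=
  let n : Int := listOfVerts.length
  let adj : PySem.Dict Int (PySem.Set Int) :=
    (PySem.List.pyRange 0 n 1).foldl (fun adj i => adj.insert i PySem.Set.empty) PySem.Dict.empty
  (listOfFaces.foldl (fun adj face =>
    face.foldl (fun adj v =>
      if 0 ≤ v ∧ v < n then
        face.foldl (fun adj w =>
          if w ≠ v then adj.modify v PySem.Set.empty (fun s => PySem.Set.add s w)
          else adj) adj
      else adj) adj) adj).items

-- ===== PRECONDITION & SPEC =====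
def Spec_makeDictOfKnots (listOfFaces : List (List Int)) (listOfVerts : List Int) (out : List (Int × List Int)) : Prop := out = makeDictOfKnots_alt listOfFaces listOfVerts
instance (listOfFaces : List (List Int)) (listOfVerts : List Int) (out : List (Int × List Int)) : Decidable (Spec_makeDictOfKnots listOfFaces listOfVerts out) := by unfold Spec_makeDictOfKnots; infer_instance

-- ===== CLAIM (what is proved, stated in full; the proofs are below) =====
def Claim_equal_makeDictOfKnots : Prop := ∀ (listOfFaces : List (List Int)) (listOfVerts : List Int), Dom_makeDictOfKnots listOfFaces listOfVerts → Spec_makeDictOfKnots listOfFaces listOfVerts (makeDictOfKnots listOfFaces listOfVerts)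

-- ===== LEMMAS AND PROOFS =====

-- Per-vertex helper functions shared by the characterisations of both ports.
def addOthers (v : Int) (f : List Int) (s : List Int) : List Int :=
  f.foldl (fun s k => if k ≠ v then PySem.Set.add s k else s) s

def rowFrom (faces : List (List Int)) (i : Int) (s : List Int) : List Int :=
  faces.foldl (fun s f => if i ∈ f then addOthers i f s else s) s

theorem mem_set_add (s : List Int) (k x : Int) : x ∈ PySem.Set.add s k ↔ x = k ∨ x ∈ s := by
  simp only [PySem.Set.add]
  split_ifs with h
  · rw [PySem.Set.contains_iff] at h
    exact ⟨Or.inr, by rintro (rfl | hx); exacts [h, hx]⟩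
  · simp [List.mem_append]; tauto

theorem mem_addOthers (v : Int) (f : List Int) (s : List Int) (x : Int) :
    x ∈ addOthers v f s ↔ x ∈ s ∨ (x ∈ f ∧ x ≠ v) := by
  induction f generalizing s with
  | nil => simp [addOthers]
  | cons k f ih =>
    have hstep : addOthers v (k :: f) s = addOthers v f (if k ≠ v then PySem.Set.add s k else s) := rfl
    rw [hstep]
    by_cases hk : k = v
    · rw [if_neg (fun hh => hh hk), ih]
      subst hk
      simp only [List.mem_cons]
      constructor
      · rintro (hx | ⟨hf, hv⟩) <;> tauto
      · rintro (hx | ⟨(rfl | hf), hv⟩) <;> tauto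
    · rw [if_pos hk, ih, mem_set_add]
      simp only [List.mem_cons]
      constructor
      · rintro ((rfl | hx) | ⟨hf, hv⟩)
        · exact Or.inr ⟨Or.inl rfl, hk⟩
        · exact Or.inl hx
        · exact Or.inr ⟨Or.inr hf, hv⟩
      · rintro (hx | ⟨(rfl | hf), hv⟩)
        · exact Or.inl (Or.inr hx)
        · exact Or.inl (Or.inl rfl)
        · exact Or.inr ⟨hf, hv⟩

theorem addOthers_eq_of_subset (v : Int) (f : List Int) (s : List Int)
    (h : ∀ w ∈ f, w ≠ v → w ∈ s) : addOthers v f s = s := by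
  induction f generalizing s with
  | nil => rfl
  | cons k f ih =>
    have hstep : addOthers v (k :: f) s = addOthers v f (if k ≠ v then PySem.Set.add s k else s) := rfl
    rw [hstep]
    by_cases hk : k = v
    · rw [if_neg (fun hh => hh hk)]
      exact ih s (fun w hw hwv => h w (by simp [hw]) hwv)
    · have hks : k ∈ s := h k (by simp) hk
      have hadd : PySem.Set.add s k = s := by
        simp [PySem.Set.add, hks]
      rw [if_pos hk, hadd]
      exact ih s (fun w hw hwv => h w (by simp [hw]) hwv)

theorem addOthers_idem (v : Int) (f : List Int) (s : List Int) :
    addOthers v f (addOthers v f s) = addOthers v f s :=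
  addOthers_eq_of_subset v f _ (fun w hw hwv => (mem_addOthers v f s w).2 (Or.inr ⟨hw, hwv⟩))

-- modify on a dict with distinct keys rewrites the value at the (unique) matching entry.
theorem modify_items_nodup (d : PySem.Dict Int (List Int)) (v : Int) (dflt : List Int)
    (h : List Int → List Int) (hnd : d.keys.Nodup) (hc : d.contains v = true) :
    (d.modify v dflt h).items = d.items.map (fun p => if p.1 = v then (p.1, h p.2) else p) := by
  simp only [PySem.Dict.modify, PySem.Dict.insert, hc, if_pos]
  apply List.map_congr_left
  intro p hp
  by_cases hpv : p.1 = v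
  · have hp' : (v, p.2) ∈ d.items := by rw [← hpv]; exact hp
    have hg := PySem.Dict.getD_of_mem_items d hp' hnd dflt
    simp [hpv, hg]
  · simp [hpv]

-- The inner loop 'for w in l: if w != v: d[v].add(w)' acts on the entry at key v only.
theorem foldl_modify_items (l : List Int) (v : Int) (d : PySem.Dict Int (List Int))
    (hnd : d.keys.Nodup) (hc : d.contains v = true) :
    (l.foldl (fun d w => if w ≠ v then d.modify v PySem.Set.empty (fun s => PySem.Set.add s w) else d) d).items
      = d.items.map (fun p => if p.1 = v then (p.1, addOthers v l p.2) else p) := by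
  induction l generalizing d with
  | nil =>
    simp only [List.foldl_nil]
    conv_lhs => rw [← List.map_id d.items]
    apply List.map_congr_left
    intro p _; by_cases h : p.1 = v <;> simp [h, addOthers, Prod.ext_iff]
  | cons w l ih =>
    simp only [List.foldl_cons]
    by_cases hw : w = v
    · rw [if_neg (fun hh => hh hw), ih d hnd hc]
      apply List.map_congr_left; intro p _
      have hrow : addOthers v (w :: l) p.2 = addOthers v l p.2 := by
        have hs : addOthers v (w :: l) p.2 = addOthers v l (if w ≠ v then PySem.Set.add p.2 w else p.2) := rfl
        rw [hs, if_neg (fun hh => hh hw)]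
      rw [hrow]
    · rw [if_pos hw]
      set d' := d.modify v PySem.Set.empty (fun s => PySem.Set.add s w) with hd'
      have hitems : d'.items = d.items.map (fun p => if p.1 = v then (p.1, PySem.Set.add p.2 w) else p) :=
        modify_items_nodup d v _ _ hnd hc
      have hkeys : d'.keys = d.keys := by
        simp only [PySem.Dict.keys, hitems, List.map_map]
        apply List.map_congr_left; intro p _
        by_cases h : p.1 = v <;> simp [h]
      have hnd' : d'.keys.Nodup := by rw [hkeys]; exact hnd
      have hc' : d'.contains v = true := by
        rw [PySem.Dict.contains_modify]; simp
      rw [ih d' hnd' hc', hitems, List.map_map]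
      apply List.map_congr_left; intro p _
      by_cases h : p.1 = v
      · have hrow : addOthers v (w :: l) p.2 = addOthers v l (PySem.Set.add p.2 w) := by
          have hs : addOthers v (w :: l) p.2 = addOthers v l (if w ≠ v then PySem.Set.add p.2 w else p.2) := rfl
          rw [hs, if_pos hw]
        simp [h, hrow, Function.comp]
      · simp [h, Function.comp]

-- A dict whose items are the vertex-index range paired with values g i.
def rangeDict (n : Int) (g : Int → List Int) : PySem.Dict Int (List Int) :=
  PySem.Dict.mk ((PySem.List.pyRange 0 n 1).map (fun i => (i, g i)))

theorem keys_rangeDict (n : Int) (g : Int → List Int) :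
    (rangeDict n g).keys = PySem.List.pyRange 0 n 1 := by
  simp [rangeDict, PySem.Dict.keys, List.map_map, Function.comp_def]

theorem nodup_keys_rangeDict (n : Int) (g : Int → List Int) : (rangeDict n g).keys.Nodup := by
  rw [keys_rangeDict]; exact PySem.List.nodup_pyRange_one 0 n

theorem contains_rangeDict (n : Int) (g : Int → List Int) (v : Int) :
    (rangeDict n g).contains v = decide (0 ≤ v ∧ v < n) := by
  rw [PySem.Dict.contains_eq_decide_mem_keys, keys_rangeDict]
  simp [PySem.List.mem_pyRange_one]

-- B's outer per-face loop over a prefix vs of the face, pointwise on the range dict.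
theorem face_fold (n : Int) (face : List Int) (vs : List Int) (g : Int → List Int) :
    (vs.foldl (fun d v => if 0 ≤ v ∧ v < n then
        face.foldl (fun d w => if w ≠ v then d.modify v PySem.Set.empty (fun s => PySem.Set.add s w) else d) d
      else d) (rangeDict n g))
    = rangeDict n (fun i => if i ∈ vs then addOthers i face (g i) else g i) := by
  induction vs generalizing g with
  | nil => simp [rangeDict]
  | cons v vs ih =>
    simp only [List.foldl_cons]
    by_cases hv : 0 ≤ v ∧ v < n
    · rw [if_pos hv]
      have hstep : (face.foldl (fun d w => if w ≠ v then d.modify v PySem.Set.empty (fun s => PySem.Set.add s w) else d) (rangeDict n g))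
          = rangeDict n (fun i => if i = v then addOthers i face (g i) else g i) := by
        apply PySem.Dict.ext
        rw [foldl_modify_items face v _ (nodup_keys_rangeDict n g)
          (by rw [contains_rangeDict]; simpa using hv)]
        simp only [rangeDict, List.map_map]
        apply List.map_congr_left; intro i _
        by_cases h : i = v <;> simp [h, Function.comp]
      rw [hstep, ih]
      unfold rangeDict
      apply congrArg PySem.Dict.mk
      apply List.map_congr_left; intro i _
      by_cases hiv : i = v
      · subst hiv
        by_cases hvs : i ∈ vs <;> simp [hvs, addOthers_idem]
      · by_cases hvs : i ∈ vs <;> simp [hiv, hvs]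
    · rw [if_neg hv, ih]
      unfold rangeDict
      apply congrArg PySem.Dict.mk
      apply List.map_congr_left; intro i hi
      have hin : 0 ≤ i ∧ i < n := PySem.List.mem_pyRange_one.1 hi
      have hiv : i ≠ v := by rintro rfl; exact hv hin
      by_cases hvs : i ∈ vs <;> simp [hiv, hvs]

-- B's main loop: a single pass over the faces updates every key pointwise.
theorem faces_fold (n : Int) (faces : List (List Int)) (g : Int → List Int) :
    (faces.foldl (fun d face =>
        face.foldl (fun d v => if 0 ≤ v ∧ v < n then
          face.foldl (fun d w => if w ≠ v then d.modify v PySem.Set.empty (fun s => PySem.Set.add s w) else d) d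
        else d) d) (rangeDict n g))
    = rangeDict n (fun i => rowFrom faces i (g i)) := by
  induction faces generalizing g with
  | nil => simp [rowFrom, rangeDict]
  | cons face faces ih =>
    simp only [List.foldl_cons]
    rw [face_fold n face face g, ih]
    unfold rangeDict
    apply congrArg PySem.Dict.mk
    apply List.map_congr_left; intro i _
    have hrow : rowFrom (face :: faces) i (g i)
        = rowFrom faces i (if i ∈ face then addOthers i face (g i) else g i) := rfl
    exact congrArg (fun s => ((i : Int), s)) hrow.symm

-- A's inner face loop for one key i, characterised pointwise.
theorem faces_fold_A (i : Int) (faces : List (List Int)) (d : PySem.Dict Int (List Int))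
    (hnd : d.keys.Nodup) (hc : d.contains i = true) :
    (faces.foldl (fun d t => if i ∈ t then
        t.foldl (fun d knot => if knot ≠ i then d.modify i PySem.Set.empty (fun s => PySem.Set.add s knot) else d) d
      else d) d).items
    = d.items.map (fun p => if p.1 = i then (p.1, rowFrom faces i p.2) else p) := by
  induction faces generalizing d with
  | nil =>
    simp only [List.foldl_nil]
    conv_lhs => rw [← List.map_id d.items]
    apply List.map_congr_left
    intro p _; by_cases h : p.1 = i <;> simp [h, rowFrom, Prod.ext_iff]
  | cons t faces ih =>
    simp only [List.foldl_cons]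
    by_cases ht : i ∈ t
    · rw [if_pos ht]
      set d' := t.foldl (fun d knot => if knot ≠ i then d.modify i PySem.Set.empty (fun s => PySem.Set.add s knot) else d) d with hd'
      have hitems : d'.items = d.items.map (fun p => if p.1 = i then (p.1, addOthers i t p.2) else p) :=
        foldl_modify_items t i d hnd hc
      have hkeys : d'.keys = d.keys := by
        simp only [PySem.Dict.keys, hitems, List.map_map]
        apply List.map_congr_left; intro p _
        by_cases h : p.1 = i <;> simp [h]
      have hc' : d'.contains i = true := by
        rw [PySem.Dict.contains_eq_decide_mem_keys] at hc ⊢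
        rw [hkeys]; exact hc
      rw [ih d' (hkeys ▸ hnd) hc', hitems, List.map_map]
      apply List.map_congr_left; intro p _
      by_cases h : p.1 = i
      · have hrow : rowFrom (t :: faces) i p.2 = rowFrom faces i (addOthers i t p.2) := by
          have hs : rowFrom (t :: faces) i p.2 = rowFrom faces i (if i ∈ t then addOthers i t p.2 else p.2) := rfl
          rw [hs, if_pos ht]
        simp [h, hrow, Function.comp]
      · simp [h, Function.comp]
    · rw [if_neg ht, ih d hnd hc]
      apply List.map_congr_left; intro p _
      by_cases h : p.1 = i
      · have hrow : rowFrom (t :: faces) i p.2 = rowFrom faces i p.2 := by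
          have hs : rowFrom (t :: faces) i p.2 = rowFrom faces i (if i ∈ t then addOthers i t p.2 else p.2) := rfl
          rw [hs, if_neg ht]
        simp [h, hrow]
      · simp [h]

-- A's outer loop over the vertex indices, for any suffix L of fresh distinct keys.
theorem A_fold (faces : List (List Int)) (L : List Int) (d : PySem.Dict Int (List Int))
    (hnd : d.keys.Nodup) (hL : L.Nodup) (hfresh : ∀ j ∈ L, d.contains j = false) :
    (L.foldl (fun knotenDict i =>
        faces.foldl (fun knotenDict triangle =>
          if i ∈ triangle then
            triangle.foldl (fun knotenDict knot =>
              if knot ≠ i then knotenDict.modify i PySem.Set.empty (fun s => PySem.Set.add s knot)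
              else knotenDict) knotenDict
          else knotenDict) (knotenDict.insert i PySem.Set.empty)) d).items
    = d.items ++ L.map (fun i => (i, rowFrom faces i PySem.Set.empty)) := by
  induction L generalizing d with
  | nil => simp
  | cons i L ih =>
    simp only [List.foldl_cons]
    have hci : d.contains i = false := hfresh i (by simp)
    have hins : (d.insert i PySem.Set.empty).items = d.items ++ [(i, PySem.Set.empty)] :=
      PySem.Dict.items_insert_of_not_contains d _ hci
    have hkeys : (d.insert i PySem.Set.empty).keys = d.keys ++ [i] := by
      simp only [PySem.Dict.keys]
      rw [hins]
      simp
    have hnotmem : i ∉ d.keys := by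
      rw [PySem.Dict.contains_eq_decide_mem_keys] at hci
      simpa using hci
    have hnd' : (d.insert i PySem.Set.empty).keys.Nodup := by
      rw [hkeys, List.nodup_append]
      refine ⟨hnd, List.nodup_singleton _, ?_⟩
      intro a ha b hb
      simp only [List.mem_cons, List.not_mem_nil, or_false] at hb
      subst hb
      exact fun h => hnotmem (h ▸ ha)
    have hc' : (d.insert i PySem.Set.empty).contains i = true := by
      rw [PySem.Dict.contains_eq_decide_mem_keys, hkeys]; simp
    have hstep : (faces.foldl (fun knotenDict triangle =>
          if i ∈ triangle then
            triangle.foldl (fun knotenDict knot =>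
              if knot ≠ i then knotenDict.modify i PySem.Set.empty (fun s => PySem.Set.add s knot)
              else knotenDict) knotenDict
          else knotenDict) (d.insert i PySem.Set.empty))
        = PySem.Dict.mk (d.items ++ [(i, rowFrom faces i PySem.Set.empty)]) := by
      apply PySem.Dict.ext
      rw [faces_fold_A i faces _ hnd' hc', hins, List.map_append]
      congr 1
      · conv_rhs => rw [← List.map_id d.items]
        apply List.map_congr_left; intro p hp
        have hmem : p.1 ∈ d.keys := List.mem_map_of_mem hp
        have hpi : ¬ p.1 = i := by rintro h; exact hnotmem (h ▸ hmem)
        simp [hpi]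
      · simp
    rw [hstep]
    have hnd2 : (PySem.Dict.mk (d.items ++ [(i, rowFrom faces i PySem.Set.empty)]) : PySem.Dict Int (List Int)).keys.Nodup := by
      simp only [PySem.Dict.keys, List.map_append]
      rw [List.nodup_append]
      refine ⟨hnd, by simp, ?_⟩
      intro a ha b hb
      simp only [List.map_cons, List.map_nil, List.mem_cons, List.not_mem_nil, or_false] at hb
      subst hb
      exact fun h => hnotmem (h ▸ ha)
    have hfresh2 : ∀ j ∈ L, (PySem.Dict.mk (d.items ++ [(i, rowFrom faces i PySem.Set.empty)]) : PySem.Dict Int (List Int)).contains j = false := by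
      intro j hj
      have hji : ¬ j = i := by rintro rfl; exact (List.nodup_cons.1 hL).1 hj
      have hdj : d.contains j = false := hfresh j (by simp [hj])
      rw [PySem.Dict.contains_eq_decide_mem_keys] at hdj ⊢
      have hdj' : j ∉ d.keys := by simpa using hdj
      simp only [PySem.Dict.keys] at hdj'
      have hmemn : j ∉ (PySem.Dict.mk (d.items ++ [(i, rowFrom faces i PySem.Set.empty)]) : PySem.Dict Int (List Int)).keys := by
        simp only [PySem.Dict.keys, List.map_append]
        intro hmem
        rcases List.mem_append.1 hmem with h1 | h2
        · exact hdj' h1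
        · simp only [List.map_cons, List.map_nil, List.mem_cons, List.not_mem_nil, or_false] at h2
          exact hji h2
      simpa using hmemn
    rw [ih _ hnd2 (List.nodup_cons.1 hL).2 hfresh2]
    simp

-- ===== VERDICT (by name: the statement is the Claim_ definition above) =====
theorem makeDictOfKnots_spec : Claim_equal_makeDictOfKnots := by
  intro listOfFaces listOfVerts _
  simp only [Spec_makeDictOfKnots, makeDictOfKnots, makeDictOfKnots_alt]
  rw [A_fold listOfFaces (PySem.List.pyRange 0 listOfVerts.length 1) PySem.Dict.empty
      (by simp [PySem.Dict.empty, PySem.Dict.keys])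
      (PySem.List.nodup_pyRange_one 0 listOfVerts.length)
      (fun j _ => PySem.Dict.contains_empty j)]
  have hinit : ((PySem.List.pyRange 0 (listOfVerts.length : Int) 1).foldl
      (fun adj i => adj.insert i PySem.Set.empty) PySem.Dict.empty)
      = rangeDict (listOfVerts.length : Int) (fun _ => PySem.Set.empty) := by
    apply PySem.Dict.ext
    rw [PySem.Dict.items_foldl_insert_fresh _ (fun i => i) (fun _ => PySem.Set.empty)
      PySem.Dict.empty (fun a _ => PySem.Dict.contains_empty a)
      (by simpa using PySem.List.nodup_pyRange_one 0 (listOfVerts.length : Int))]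
    simp [rangeDict, PySem.Dict.empty]
  rw [hinit, faces_fold (listOfVerts.length : Int) listOfFaces (fun _ => PySem.Set.empty)]
  simp [rangeDict, PySem.Dict.empty]
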